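-- pv_equiv track=rewrite | github.com/Kudito98/Codesignal-tasks | code-arcade/76-integerToStringOfFixedWidth/integerToStringOfFixedWidth.py | solution
-- ===== SOURCE A (Python) =====
-- def solution(number, width):
--     numberStr = str(number)[::-1]
--     newNumber = ""
--     for i in range(width):
--         if len(numberStr) > i:
--             newNumber += numberStr[i]
--         else:
--             newNumber += "0"
--     return newNumber[::-1]
-- ===== SOURCE B (Python) =====
-- def solution(number, width):
--     s = str(number)
--     n = len(s)
--     if width <= n:
--         return s[n - width:]
--     return "0" * (width - n) + s
-- ===== Notes on version B (the rewrite author's own statement) =====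
-- stated objective: faster
-- what changed: Replaces the reverse + per-character width loop + second reverse with one arithmetic split: slice s[n-width:] when width <= len(str(number)), else '0'*(width-n) + s.
import Mathlib
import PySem

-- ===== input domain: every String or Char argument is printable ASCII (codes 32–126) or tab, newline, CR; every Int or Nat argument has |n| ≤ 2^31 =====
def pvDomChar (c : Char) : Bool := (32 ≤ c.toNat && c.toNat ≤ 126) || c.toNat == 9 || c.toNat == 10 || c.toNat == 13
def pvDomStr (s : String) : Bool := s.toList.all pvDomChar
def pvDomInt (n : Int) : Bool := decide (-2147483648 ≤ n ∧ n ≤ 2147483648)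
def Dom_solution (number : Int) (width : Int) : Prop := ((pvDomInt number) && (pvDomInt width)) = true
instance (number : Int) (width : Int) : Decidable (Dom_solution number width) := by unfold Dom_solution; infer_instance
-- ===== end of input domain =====

-- B pads str(number) to the width by arithmetic (one slice or one block of zeros) instead of A's reverse / per-index loop / reverse.

-- ===== PORT A =====
def solution (number : Int) (width : Int) : String :=
  let numberStr := (PySem.Int.toStr number).toList.reverse
  let newNumber := (PySem.List.pyRange 0 width 1).foldl
    (fun acc i => if (numberStr.length : Int) > i then acc ++ [PySem.List.pyGetD numberStr i '0'] else acc ++ ['0'])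
    ([] : List Char)
  String.ofList newNumber.reverse

-- ===== PORT B =====
def solution_alt (number : Int) (width : Int) : String :=
  let s := (PySem.Int.toStr number).toList
  let n : Int := s.length
  if width ≤ n then String.ofList (PySem.List.slice s (some (n - width)) none)
  else String.ofList (List.replicate (width - n).toNat '0' ++ s)

-- ===== PRECONDITION & SPEC =====
def Spec_solution (number : Int) (width : Int) (out : String) : Prop := out = solution_alt number width
instance (number : Int) (width : Int) (out : String) : Decidable (Spec_solution number width out) := by unfold Spec_solution; infer_instance

-- ===== CLAIM (what is proved, stated in full; the proofs are below) =====
def Claim_equal_solution : Prop := ∀ (number : Int) (width : Int), Dom_solution number width → Spec_solution number width (solution number width)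

-- ===== LEMMAS AND PROOFS =====

lemma map_range_getD (rl : List Char) (w : Nat) :
    (List.range w).map (fun k => rl.getD k '0') = rl.take w ++ List.replicate (w - rl.length) '0' := by
  induction rl generalizing w with
  | nil => simp [List.map_const']
  | cons c cs ih =>
    cases w with
    | zero => simp
    | succ m =>
      rw [List.range_succ_eq_map]
      simp [Function.comp_def, ← ih m, List.getD]

lemma foldl_body (rl : List Char) (L : List Int) (acc : List Char) :
    L.foldl (fun acc i => if (rl.length : Int) > i then acc ++ [PySem.List.pyGetD rl i '0'] else acc ++ ['0']) acc
      = acc ++ L.map (fun i => if (rl.length : Int) > i then PySem.List.pyGetD rl i '0' else '0') := by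
  induction L generalizing acc with
  | nil => simp
  | cons x xs ih => simp only [List.foldl_cons, List.map_cons]; split <;> rw [ih] <;> simp

lemma pick_eq_getD (rl : List Char) (k : Nat) :
    (if (rl.length : Int) > (0 + (k : Int)) then PySem.List.pyGetD rl (0 + (k : Int)) '0' else '0')
      = rl.getD k '0' := by
  simp only [zero_add]
  rw [PySem.List.pyGetD_natCast]
  split
  · rfl
  · rw [List.getD_eq_default]
    omega

-- ===== VERDICT (by name: the statement is the Claim_ definition above) =====
theorem solution_spec : Claim_equal_solution := by
  intro number width _
  unfold Spec_solution solution solution_alt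
  simp only []
  set l := (PySem.Int.toStr number).toList with hl
  rw [foldl_body, List.nil_append, PySem.List.pyRange_one, List.map_map]
  simp only [Function.comp_def]
  rw [List.map_congr_left (fun k _ => pick_eq_getD l.reverse k), map_range_getD, List.reverse_append, List.reverse_replicate, List.take_reverse, List.reverse_reverse]
  simp only [List.length_reverse, Int.sub_zero]
  by_cases hw : width ≤ (l.length : Int)
  · have hnn : (0 : Int) ≤ (l.length : Int) - width := by omega
    rw [if_pos hw, PySem.List.slice_from _ hnn]
    congr 1
    by_cases h0 : 0 ≤ width
    · have : (width.toNat - l.length) = 0 := by omega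
      rw [this, List.replicate_zero, List.nil_append]
      congr 1
      omega
    · have h1 : width.toNat = 0 := by omega
      rw [h1]
      simp only [Nat.zero_sub, List.replicate_zero, List.nil_append]
      rw [List.drop_of_length_le (by omega), List.drop_of_length_le (by omega)]
  · rw [if_neg hw]
    congr 1
    have h1 : l.length - width.toNat = 0 := by omega
    rw [h1, List.drop_zero]
    congr 2
    omega
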